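-- pv_equiv track=rewrite | github.com/annah11/A2SV-hub | E_Symmetrization.py | min_flips_to_symmetrize
-- ===== SOURCE A (Python) =====
-- def min_flips_to_symmetrize(grid, n):
--     total_flips = 0
--
--     for r in range((n + 1) // 2):
--         for c in range(n // 2):
--             vals = [
--                 grid[r][c],
--                 grid[c][n - 1 - r],
--                 grid[n - 1 - r][n - 1 - c],
--                 grid[n - 1 - c][r]
--             ]
--
--             ones = sum(1 for v in vals if v == '1')
--             zeros = 4 - ones
--
--             total_flips += min(ones, zeros)
--
--     return total_flips
-- ===== SOURCE B (Python) =====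
-- def min_flips_to_symmetrize(grid, n):
--     # Group every cell by the canonical (lexicographically smallest) member of
--     # its 4-rotation orbit in a dict of (ones, size) counters, then pay the
--     # cheaper side of each group.
--     groups = {}
--     for i in range(n):
--         for j in range(n):
--             key = min((i, j), (j, n - 1 - i), (n - 1 - i, n - 1 - j), (n - 1 - j, i))
--             ones, tot = groups.get(key, (0, 0))
--             groups[key] = (ones + (1 if grid[i][j] == '1' else 0), tot + 1)
--     return sum(min(ones, tot - ones) for ones, tot in groups.values())
-- ===== Notes on version B (the rewrite author's own statement) =====
-- stated objective: alternative
-- what changed: Instead of A's direct double loop over one quadrant summing min(ones, 4-ones) of the four rotated reads per cell, B scans the whole square once building a dict keyed by the lexicographically smallest member of each cell's rotation orbit with (ones, size) counters, then sums min(ones, size-ones) over the dict's values (the odd-n centre forms a size-1 group contributing 0).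
-- outside the precondition, e.g. on min_flips_to_symmetrize([''], 1): A returns 0, B raises IndexError; on min_flips_to_symmetrize([], 1): A returns 0, B raises IndexError
import Mathlib
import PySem

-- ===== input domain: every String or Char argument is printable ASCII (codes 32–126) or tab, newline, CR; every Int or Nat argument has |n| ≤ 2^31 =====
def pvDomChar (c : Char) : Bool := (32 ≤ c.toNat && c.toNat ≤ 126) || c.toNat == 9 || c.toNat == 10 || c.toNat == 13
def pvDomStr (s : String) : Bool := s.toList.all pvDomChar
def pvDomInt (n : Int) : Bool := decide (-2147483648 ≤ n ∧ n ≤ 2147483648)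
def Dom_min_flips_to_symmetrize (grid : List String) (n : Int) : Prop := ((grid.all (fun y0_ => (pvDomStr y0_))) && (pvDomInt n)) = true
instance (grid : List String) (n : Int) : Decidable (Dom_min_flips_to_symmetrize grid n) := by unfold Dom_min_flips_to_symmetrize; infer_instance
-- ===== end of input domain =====

-- B replaces A's quadrant double loop by a dict that groups every cell of the square
-- under the lexicographically smallest member of its rotation orbit, counting ones and
-- group size, and then sums the cheaper side of each group; alternative decomposition,
-- same O(n^2) cost.

-- grid[i][j] as a Char; Pre_ guarantees both indices are in range, the defaults are never used there
def pvAt (grid : List String) (i j : Int) : Char :=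
  (PySem.Str.pyGet? (PySem.List.pyGetD grid i "") j).getD ' '

-- ===== PORT A =====
def min_flips_to_symmetrize (grid : List String) (n : Int) : Int :=
  (PySem.List.pyRange 0 (PySem.Int.floordiv (n + 1) 2) 1).foldl (fun total_flips r =>
    (PySem.List.pyRange 0 (PySem.Int.floordiv n 2) 1).foldl (fun total_flips c =>
      let vals : List Char :=
        [pvAt grid r c, pvAt grid c (n - 1 - r), pvAt grid (n - 1 - r) (n - 1 - c),
         pvAt grid (n - 1 - c) r]
      let ones : Int := vals.foldl (fun a v => if v = '1' then a + 1 else a) 0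
      let zeros : Int := 4 - ones
      total_flips + min ones zeros) total_flips) 0

-- ===== PORT B =====
-- Python's binary min on int pairs (lexicographic; keeps the first argument on ties)
def pvPairMin (p q : Int × Int) : Int × Int :=
  if q.1 < p.1 ∨ (q.1 = p.1 ∧ q.2 < p.2) then q else p

def min_flips_to_symmetrize_alt (grid : List String) (n : Int) : Int :=
  let groups := (PySem.List.pyRange 0 n 1).foldl (fun groups i =>
    (PySem.List.pyRange 0 n 1).foldl (fun groups j =>
      let key := pvPairMin (pvPairMin (pvPairMin (i, j) (j, n - 1 - i))
        (n - 1 - i, n - 1 - j)) (n - 1 - j, i)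
      let v := PySem.Dict.getD groups key (0, 0)
      PySem.Dict.insert groups key
        (v.1 + (if pvAt grid i j = '1' then 1 else 0), v.2 + 1)) groups)
    PySem.Dict.empty
  (PySem.Dict.values groups).foldl (fun s p => s + min p.1 (p.2 - p.1)) 0

-- ===== PRECONDITION & SPEC =====
-- For n ≥ 1, Pre_ requires a full n×n grid. This is slightly narrower than A's exact
-- no-raise condition only for n = 1 (A reads no cell then, B reads the centre): the
-- natural domain of the task is an n×n grid, and B raises IndexError outside it.
def Pre_min_flips_to_symmetrize (grid : List String) (n : Int) : Prop :=
  n ≤ 0 ∨ (n ≤ (grid.length : Int) ∧ ∀ s ∈ grid.take n.toNat, n ≤ (s.toList.length : Int))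
instance (grid : List String) (n : Int) : Decidable (Pre_min_flips_to_symmetrize grid n) := by
  unfold Pre_min_flips_to_symmetrize; infer_instance

def pvWitness_min_flips_to_symmetrize : List String × Int := (["10", "01"], 2)

def Spec_min_flips_to_symmetrize (grid : List String) (n : Int) (out : Int) : Prop := out = min_flips_to_symmetrize_alt grid n
instance (grid : List String) (n : Int) (out : Int) : Decidable (Spec_min_flips_to_symmetrize grid n out) := by unfold Spec_min_flips_to_symmetrize; infer_instance

-- ===== CLAIM (what is proved, stated in full; the proofs are below) =====
def Claim_equal_min_flips_to_symmetrize : Prop := ∀ (grid : List String) (n : Int), Dom_min_flips_to_symmetrize grid n → Pre_min_flips_to_symmetrize grid n → Spec_min_flips_to_symmetrize grid n (min_flips_to_symmetrize grid n)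

-- ===== LEMMAS AND PROOFS =====

def pvOne (grid : List String) (i j : Int) : Int :=
  if pvAt grid i j = '1' then 1 else 0

-- the flip cost of the rotation orbit of cell (i, j)
def pvTerm (grid : List String) (n i j : Int) : Int :=
  let k := pvOne grid i j + pvOne grid j (n - 1 - i) +
           pvOne grid (n - 1 - i) (n - 1 - j) + pvOne grid (n - 1 - j) i
  if k ≤ 2 then k else 4 - k

lemma pvOne_mem (g : List String) (i j : Int) : pvOne g i j = 0 ∨ pvOne g i j = 1 := by
  unfold pvOne; split <;> simp

-- the orbit cost is invariant under the quarter rotation (i, j) ↦ (j, n-1-i)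
lemma pvTerm_rot (g : List String) (n i j : Int) :
    pvTerm g n j (n - 1 - i) = pvTerm g n i j := by
  simp only [pvTerm]
  rw [show n - 1 - (n - 1 - i) = i from by ring]
  rw [show pvOne g j (n - 1 - i) + pvOne g (n - 1 - i) (n - 1 - j) + pvOne g (n - 1 - j) i +
        pvOne g i j
      = pvOne g i j + pvOne g j (n - 1 - i) + pvOne g (n - 1 - i) (n - 1 - j) +
        pvOne g (n - 1 - j) i from by ring]

-- A's inner-loop increment is exactly the orbit cost
lemma pvInner_eq (g : List String) (n r c : Int) :
    min ([pvAt g r c, pvAt g c (n - 1 - r), pvAt g (n - 1 - r) (n - 1 - c),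
          pvAt g (n - 1 - c) r].foldl (fun a v => if v = '1' then a + 1 else a) 0)
        (4 - [pvAt g r c, pvAt g c (n - 1 - r), pvAt g (n - 1 - r) (n - 1 - c),
          pvAt g (n - 1 - c) r].foldl (fun a v => if v = '1' then a + 1 else a) 0)
      = pvTerm g n r c := by
  simp only [List.foldl, pvTerm, pvOne, min_def]
  split_ifs <;> omega

lemma list_range_sum (t : ℕ) (g : ℕ → ℤ) :
    ((List.range t).map g).sum = ∑ k ∈ Finset.range t, g k := by
  induction t with
  | zero => simp
  | succ m ih => simp [List.range_succ, Finset.sum_range_succ, ih]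

lemma foldl_pyRange_add (m : Int) (f : Int → Int) (a : Int) :
    (PySem.List.pyRange 0 m 1).foldl (fun acc x => acc + f x) a
      = a + ∑ k ∈ Finset.range m.toNat, f (k : Int) := by
  rw [PySem.List.foldl_add]
  congr 1
  rw [PySem.List.pyRange_one, List.map_map, list_range_sum]
  simp

-- A as a double Finset sum of orbit costs over the quadrant
lemma A_eq_sum (grid : List String) (n : Int) :
    min_flips_to_symmetrize grid n
      = ∑ r ∈ Finset.range (PySem.Int.floordiv (n + 1) 2).toNat,
          ∑ c ∈ Finset.range (PySem.Int.floordiv n 2).toNat,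
            pvTerm grid n (r : Int) (c : Int) := by
  unfold min_flips_to_symmetrize
  have hfun : (fun (total_flips r : Int) =>
      (PySem.List.pyRange 0 (PySem.Int.floordiv n 2) 1).foldl (fun total_flips c =>
        let vals : List Char :=
          [pvAt grid r c, pvAt grid c (n - 1 - r), pvAt grid (n - 1 - r) (n - 1 - c),
           pvAt grid (n - 1 - c) r]
        let ones : Int := vals.foldl (fun a v => if v = '1' then a + 1 else a) 0
        let zeros : Int := 4 - ones
        total_flips + min ones zeros) total_flips)
      = fun (total_flips r : Int) =>
        total_flips + ∑ c ∈ Finset.range (PySem.Int.floordiv n 2).toNat,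
          pvTerm grid n r (c : Int) := by
    funext t r
    show (PySem.List.pyRange 0 (PySem.Int.floordiv n 2) 1).foldl
        (fun acc c => acc + min _ _) t = _
    rw [show (fun (acc c : Int) =>
          acc + min ([pvAt grid r c, pvAt grid c (n - 1 - r), pvAt grid (n - 1 - r) (n - 1 - c),
              pvAt grid (n - 1 - c) r].foldl (fun a v => if v = '1' then a + 1 else a) 0)
            (4 - [pvAt grid r c, pvAt grid c (n - 1 - r), pvAt grid (n - 1 - r) (n - 1 - c),
              pvAt grid (n - 1 - c) r].foldl (fun a v => if v = '1' then a + 1 else a) 0))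
        = fun (acc c : Int) => acc + pvTerm grid n r c from by
      funext acc c; rw [pvInner_eq]]
    exact foldl_pyRange_add _ _ t
  rw [hfun, foldl_pyRange_add _ (fun r => ∑ c ∈ Finset.range (PySem.Int.floordiv n 2).toNat,
        pvTerm grid n r (c : Int)) 0]
  simp

-- the combinatorial heart: the square decomposes into four rotated copies of the
-- quadrant plus (for odd N) the centre, so a rotation-invariant cost summed over the
-- square is four times its sum over the quadrant (the centre contributing zero)
lemma pv_core (G : ℕ × ℕ → ℤ) (N : ℕ)
    (hrot : ∀ i j : ℕ, i < N → j < N → G (j, N - 1 - i) = G (i, j))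
    (hcen : N % 2 = 1 → G (N / 2, N / 2) = 0) :
    ∑ p ∈ Finset.range N ×ˢ Finset.range N, G p
      = 4 * ∑ p ∈ Finset.range ((N + 1) / 2) ×ˢ Finset.range (N / 2), G p := by
  rcases Nat.eq_zero_or_pos N with h0 | hNpos
  · subst h0; simp
  set H := (N + 1) / 2 with hH
  set F := N / 2 with hF
  have hHF : H + F = N ∧ F ≤ H ∧ H ≤ F + 1 := by omega
  set ρ : ℕ × ℕ → ℕ × ℕ := fun p => (p.2, N - 1 - p.1) with hρ
  set Q : Finset (ℕ × ℕ) := Finset.range H ×ˢ Finset.range F with hQ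
  set Q1 : Finset (ℕ × ℕ) := Finset.range F ×ˢ Finset.Ico F N with hQ1
  set Q2 : Finset (ℕ × ℕ) := Finset.Ico F N ×ˢ Finset.Ico H N with hQ2
  set Q3 : Finset (ℕ × ℕ) := Finset.Ico H N ×ˢ Finset.range H with hQ3
  set C : Finset (ℕ × ℕ) := if N % 2 = 1 then {(F, F)} else ∅ with hC
  have hiQ1 : Q.image ρ = Q1 := by
    ext ⟨x, y⟩
    simp only [hQ, hQ1, hρ, Finset.mem_image, Finset.mem_product, Finset.mem_range,
      Finset.mem_Ico, Prod.ext_iff]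
    constructor
    · rintro ⟨⟨a, b⟩, ⟨ha, hb⟩, hx, hy⟩; simp only at hx hy; omega
    · rintro ⟨hx, hy1, hy2⟩; exact ⟨(N - 1 - y, x), ⟨by omega, by omega⟩, by simp; omega⟩
  have hiQ2 : Q1.image ρ = Q2 := by
    ext ⟨x, y⟩
    simp only [hQ1, hQ2, hρ, Finset.mem_image, Finset.mem_product, Finset.mem_range,
      Finset.mem_Ico, Prod.ext_iff]
    constructor
    · rintro ⟨⟨a, b⟩, ⟨ha, hb⟩, hx, hy⟩; simp only at hx hy; omega
    · rintro ⟨⟨hx1, hx2⟩, hy1, hy2⟩; exact ⟨(N - 1 - y, x), ⟨by omega, by omega, by omega⟩, by simp; omega⟩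
  have hiQ3 : Q2.image ρ = Q3 := by
    ext ⟨x, y⟩
    simp only [hQ2, hQ3, hρ, Finset.mem_image, Finset.mem_product, Finset.mem_range,
      Finset.mem_Ico, Prod.ext_iff]
    constructor
    · rintro ⟨⟨a, b⟩, ⟨ha, hb⟩, hx, hy⟩; simp only at hx hy; omega
    · rintro ⟨⟨hx1, hx2⟩, hy⟩; exact ⟨(N - 1 - y, x), ⟨⟨by omega, by omega⟩, by omega, by omega⟩, by simp; omega⟩
  have hinj : ∀ (s : Finset (ℕ × ℕ)), (∀ p ∈ s, p.1 < N) →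
      ∀ x ∈ s, ∀ y ∈ s, ρ x = ρ y → x = y := by
    intro s hs x hx y hy hxy
    have h1 := hs x hx; have h2 := hs y hy
    cases x; cases y
    simp only [hρ, Prod.ext_iff] at hxy ⊢
    simp only at h1 h2
    omega
  have hsub : ∀ (s : Finset (ℕ × ℕ)), (∀ p ∈ s, p.1 < N ∧ p.2 < N) →
      ∑ p ∈ s.image ρ, G p = ∑ p ∈ s, G p := by
    intro s hs
    rw [Finset.sum_image (hinj s (fun p hp => (hs p hp).1))]
    refine Finset.sum_congr rfl fun p hp => ?_
    obtain ⟨h1, h2⟩ := hs p hp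
    have := hrot p.1 p.2 h1 h2
    simpa [hρ] using this
  have hsQ1 : ∑ p ∈ Q1, G p = ∑ p ∈ Q, G p := by
    rw [← hiQ1]
    exact hsub Q (by
      rintro ⟨a, b⟩ hp
      simp only [hQ, Finset.mem_product, Finset.mem_range] at hp
      omega)
  have hsQ2 : ∑ p ∈ Q2, G p = ∑ p ∈ Q1, G p := by
    rw [← hiQ2]
    exact hsub Q1 (by
      rintro ⟨a, b⟩ hp
      simp only [hQ1, Finset.mem_product, Finset.mem_range, Finset.mem_Ico] at hp
      omega)
  have hsQ3 : ∑ p ∈ Q3, G p = ∑ p ∈ Q2, G p := by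
    rw [← hiQ3]
    exact hsub Q2 (by
      rintro ⟨a, b⟩ hp
      simp only [hQ2, Finset.mem_product, Finset.mem_Ico] at hp
      omega)
  have hunion : Finset.range N ×ˢ Finset.range N = (((Q ∪ Q1) ∪ Q2) ∪ Q3) ∪ C := by
    ext ⟨x, y⟩
    by_cases hm : N % 2 = 1 <;>
      simp only [hQ, hQ1, hQ2, hQ3, hC, hm, if_true, if_false, Finset.mem_union,
        Finset.mem_product, Finset.mem_range, Finset.mem_Ico, Finset.mem_singleton,
        Finset.notMem_empty, Prod.ext_iff, or_false] <;>
      constructor <;> intro h <;> omega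
  have d1 : Disjoint Q Q1 := by
    rw [Finset.disjoint_left]; rintro ⟨x, y⟩ h1 h2
    simp only [hQ, hQ1, Finset.mem_product, Finset.mem_range, Finset.mem_Ico] at h1 h2; omega
  have d2 : Disjoint (Q ∪ Q1) Q2 := by
    rw [Finset.disjoint_left]; rintro ⟨x, y⟩ h1 h2
    simp only [hQ, hQ1, hQ2, Finset.mem_union, Finset.mem_product, Finset.mem_range,
      Finset.mem_Ico] at h1 h2; omega
  have d3 : Disjoint ((Q ∪ Q1) ∪ Q2) Q3 := by
    rw [Finset.disjoint_left]; rintro ⟨x, y⟩ h1 h2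
    simp only [hQ, hQ1, hQ2, hQ3, Finset.mem_union, Finset.mem_product, Finset.mem_range,
      Finset.mem_Ico] at h1 h2; omega
  have d4 : Disjoint (((Q ∪ Q1) ∪ Q2) ∪ Q3) C := by
    rw [Finset.disjoint_left]; rintro ⟨x, y⟩ h1 h2
    by_cases hm : N % 2 = 1
    · simp only [hQ, hQ1, hQ2, hQ3, hC, hm, if_true, Finset.mem_union,
        Finset.mem_product, Finset.mem_range, Finset.mem_Ico, Finset.mem_singleton,
        Prod.ext_iff] at h1 h2
      omega
    · simp only [hC, hm, if_false, Finset.notMem_empty] at h2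
  have hCsum : ∑ p ∈ C, G p = 0 := by
    by_cases hm : N % 2 = 1
    · rw [hC, if_pos hm, Finset.sum_singleton, hcen hm]
    · rw [hC, if_neg hm, Finset.sum_empty]
  rw [hunion, Finset.sum_union d4, Finset.sum_union d3, Finset.sum_union d2,
    Finset.sum_union d1, hCsum, hsQ3, hsQ2, hsQ1]
  ring

-- ---------- B-side machinery ----------

-- the quarter rotation on integer coordinates
def pvRho (n : Int) (p : Int × Int) : Int × Int := (p.2, n - 1 - p.1)

-- B's canonical key as a function of the cell
def pvKeyF (n : Int) (p : Int × Int) : Int × Int :=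
  pvPairMin (pvPairMin (pvPairMin p (pvRho n p)) (pvRho n (pvRho n p)))
    (pvRho n (pvRho n (pvRho n p)))

def pvBit (grid : List String) (p : Int × Int) : Int := pvOne grid p.1 p.2

-- all cells of the square, row by row
def pvCells (n : Int) : List (Int × Int) :=
  (PySem.List.pyRange 0 n 1).flatMap (fun i => (PySem.List.pyRange 0 n 1).map (fun j => (i, j)))

-- B's grouping loop over an arbitrary cell list
def pvBuild (grid : List String) (n : Int) (L : List (Int × Int))
    (d : PySem.Dict (Int × Int) (Int × Int)) : PySem.Dict (Int × Int) (Int × Int) :=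
  L.foldl (fun d p =>
    d.insert (pvKeyF n p)
      ((d.getD (pvKeyF n p) (0, 0)).1 + pvBit grid p, (d.getD (pvKeyF n p) (0, 0)).2 + 1)) d

lemma pvPairMin_comm (p q : Int × Int) : pvPairMin p q = pvPairMin q p := by
  obtain ⟨a, b⟩ := p; obtain ⟨c, d⟩ := q
  simp only [pvPairMin, Prod.ext_iff]
  split_ifs <;> simp_all <;> omega

lemma pvPairMin_assoc (p q r : Int × Int) :
    pvPairMin (pvPairMin p q) r = pvPairMin p (pvPairMin q r) := by
  obtain ⟨a, b⟩ := p; obtain ⟨c, d⟩ := q; obtain ⟨e, f⟩ := r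
  simp only [pvPairMin, Prod.ext_iff]
  split_ifs <;> simp_all <;> omega

lemma pvPairMin_cases (p q : Int × Int) : pvPairMin p q = p ∨ pvPairMin p q = q := by
  unfold pvPairMin; split_ifs <;> tauto

lemma pvRho4 (n : Int) (p : Int × Int) : pvRho n (pvRho n (pvRho n (pvRho n p))) = p := by
  obtain ⟨a, b⟩ := p; simp only [pvRho, Prod.ext_iff]; omega

lemma pvKeyF_mem (n : Int) (p : Int × Int) :
    pvKeyF n p = p ∨ pvKeyF n p = pvRho n p ∨ pvKeyF n p = pvRho n (pvRho n p) ∨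
      pvKeyF n p = pvRho n (pvRho n (pvRho n p)) := by
  unfold pvKeyF
  rcases pvPairMin_cases (pvPairMin (pvPairMin p (pvRho n p)) (pvRho n (pvRho n p)))
      (pvRho n (pvRho n (pvRho n p))) with h | h <;> rw [h]
  · rcases pvPairMin_cases (pvPairMin p (pvRho n p)) (pvRho n (pvRho n p)) with h2 | h2 <;> rw [h2]
    · rcases pvPairMin_cases p (pvRho n p) with h3 | h3 <;> rw [h3] <;> tauto
    · tauto
  · tauto

-- the key is invariant under the quarter rotation
lemma pvKeyF_rho (n : Int) (p : Int × Int) : pvKeyF n (pvRho n p) = pvKeyF n p := by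
  unfold pvKeyF
  rw [pvRho4]
  set a := p
  set b := pvRho n p
  set c := pvRho n (pvRho n p)
  set d := pvRho n (pvRho n (pvRho n p))
  calc pvPairMin (pvPairMin (pvPairMin b c) d) a
      = pvPairMin a (pvPairMin (pvPairMin b c) d) := pvPairMin_comm _ _
    _ = pvPairMin (pvPairMin a (pvPairMin b c)) d := (pvPairMin_assoc _ _ _).symm
    _ = pvPairMin (pvPairMin (pvPairMin a b) c) d := by rw [pvPairMin_assoc a b c]

-- equal keys put the two cells in one rotation orbit
lemma pvKeyF_orbit (n : Int) (p q : Int × Int) (h : pvKeyF n p = pvKeyF n q) :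
    p = q ∨ p = pvRho n q ∨ p = pvRho n (pvRho n q) ∨ p = pvRho n (pvRho n (pvRho n q)) := by
  obtain ⟨a, b⟩ := p; obtain ⟨c, d⟩ := q
  rcases pvKeyF_mem n (a, b) with h1 | h1 | h1 | h1 <;>
    rcases pvKeyF_mem n (c, d) with h2 | h2 | h2 | h2 <;>
    · rw [h1, h2] at h
      try simp only [pvRho, Prod.ext_iff] at h
      try simp only [pvRho, Prod.ext_iff]
      omega

lemma pvMem_cells (n : Int) (p : Int × Int) :
    p ∈ pvCells n ↔ 0 ≤ p.1 ∧ p.1 < n ∧ 0 ≤ p.2 ∧ p.2 < n := by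
  obtain ⟨a, b⟩ := p
  simp only [pvCells, List.mem_flatMap, List.mem_map, Prod.ext_iff]
  constructor
  · rintro ⟨i, hi, j, hj, h1, h2⟩
    rw [PySem.List.mem_pyRange_one] at hi hj
    omega
  · rintro ⟨h1, h2, h3, h4⟩
    exact ⟨a, by rw [PySem.List.mem_pyRange_one]; omega,
      b, by rw [PySem.List.mem_pyRange_one]; omega, rfl, rfl⟩

lemma pvPyRange_nodup (m : Int) : (PySem.List.pyRange 0 m 1).Nodup := by
  rw [PySem.List.pyRange_one]
  exact List.Nodup.map (fun a b h => by omega) List.nodup_range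

lemma pvCells_nodup (n : Int) : (pvCells n).Nodup := by
  rw [pvCells, List.nodup_flatMap]
  refine ⟨fun i _ => List.Nodup.map (fun a b h => by simpa using h) (pvPyRange_nodup n), ?_⟩
  refine List.Pairwise.imp ?_ (pvPyRange_nodup n)
  intro i i' hne x hx hx'
  simp only [List.mem_map] at hx hx'
  obtain ⟨j, _, rfl⟩ := hx
  obtain ⟨j', _, h⟩ := hx'
  exact hne (by simpa using congrArg Prod.fst h.symm)

lemma pvRho_mem (n : Int) (p : Int × Int) (h : p ∈ pvCells n) : pvRho n p ∈ pvCells n := by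
  rw [pvMem_cells] at h ⊢
  simp only [pvRho]
  omega

-- the port's inline key expression is pvKeyF
lemma pvKey_port (n i j : Int) :
    pvPairMin (pvPairMin (pvPairMin (i, j) (j, n - 1 - i)) (n - 1 - i, n - 1 - j))
        (n - 1 - j, i) = pvKeyF n (i, j) := by
  have h : n - 1 - (n - 1 - i) = i := by ring
  simp [pvKeyF, pvRho, h]

-- B is the grouping loop over the flattened cell list followed by the values sum
lemma pvB_as_fold (grid : List String) (n : Int) :
    min_flips_to_symmetrize_alt grid n
      = ((pvBuild grid n (pvCells n) PySem.Dict.empty).values).foldl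
          (fun s p => s + min p.1 (p.2 - p.1)) 0 := by
  have hd : (PySem.List.pyRange 0 n 1).foldl (fun groups i =>
      (PySem.List.pyRange 0 n 1).foldl (fun groups j =>
        let key := pvPairMin (pvPairMin (pvPairMin (i, j) (j, n - 1 - i))
          (n - 1 - i, n - 1 - j)) (n - 1 - j, i)
        let v := PySem.Dict.getD groups key (0, 0)
        PySem.Dict.insert groups key
          (v.1 + (if pvAt grid i j = '1' then 1 else 0), v.2 + 1)) groups)
      PySem.Dict.empty = pvBuild grid n (pvCells n) PySem.Dict.empty := by
    unfold pvBuild pvCells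
    rw [List.foldl_flatMap]
    congr 1
    funext d i
    rw [List.foldl_map]
    congr 1
    funext d j
    rw [pvKey_port]
    simp [pvBit, pvOne]
  unfold min_flips_to_symmetrize_alt
  rw [hd]

lemma pvBuild_getD (grid : List String) (n : Int) (L : List (Int × Int)) :
    ∀ (d : PySem.Dict (Int × Int) (Int × Int)) (k : Int × Int),
    (pvBuild grid n L d).getD k (0, 0) =
      ((d.getD k (0, 0)).1 + ((L.filter (fun p => pvKeyF n p == k)).map (pvBit grid)).sum,
       (d.getD k (0, 0)).2 + (L.countP (fun p => pvKeyF n p == k) : Int)) := by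
  induction L with
  | nil => intro d k; simp [pvBuild]
  | cons p L ih =>
    intro d k
    have hcons : pvBuild grid n (p :: L) d
        = pvBuild grid n L (d.insert (pvKeyF n p)
            ((d.getD (pvKeyF n p) (0, 0)).1 + pvBit grid p,
             (d.getD (pvKeyF n p) (0, 0)).2 + 1)) := rfl
    rw [hcons, ih, PySem.Dict.getD_insert]
    by_cases hk : k = pvKeyF n p
    · subst hk
      simp only [List.filter_cons, List.countP_cons, beq_self_eq_true, if_true,
        List.map_cons, List.sum_cons]
      refine Prod.ext ?_ ?_ <;> (dsimp only; push_cast; ring)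
    · have hne : (pvKeyF n p == k) = false := by
        simp [beq_eq_false_iff_ne]; exact fun h => hk h.symm
      simp only [if_neg hk, List.filter_cons, List.countP_cons, hne]
      simp

lemma pvBuild_keys (grid : List String) (n : Int) (L : List (Int × Int)) :
    (pvBuild grid n L PySem.Dict.empty).keys = PySem.Set.ofList (L.map (pvKeyF n)) := by
  unfold pvBuild
  rw [PySem.Dict.keys_foldl_insert_key (key := pvKeyF n)
    (f := fun d p => ((d.getD (pvKeyF n p) (0, 0)).1 + pvBit grid p,
      (d.getD (pvKeyF n p) (0, 0)).2 + 1))]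
  simp [PySem.Dict.keys_empty, PySem.Set.update, PySem.Set.ofList_eq_foldl]

lemma pvBuild_nodup_keys (grid : List String) (n : Int) (L : List (Int × Int)) :
    (pvBuild grid n L PySem.Dict.empty).keys.Nodup := by
  unfold pvBuild
  exact PySem.Dict.nodup_keys_foldl_insert_key L (pvKeyF n)
    (fun d p => ((d.getD (pvKeyF n p) (0, 0)).1 + pvBit grid p,
      (d.getD (pvKeyF n p) (0, 0)).2 + 1)) PySem.Dict.empty PySem.Dict.nodup_keys_empty

-- the fiber of a canonical key inside the square, and its ones count
def pvFib (n : Int) (k : Int × Int) : Finset (Int × Int) :=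
  (pvCells n).toFinset.filter (fun p => pvKeyF n p = k)

def pvO (grid : List String) (n : Int) (k : Int × Int) : Int :=
  ∑ p ∈ pvFib n k, pvBit grid p

lemma pv_toFinset_map (l : List (Int × Int)) (f : Int × Int → Int × Int) :
    (l.map f).toFinset = l.toFinset.image f := by
  ext x; simp

-- B as a Finset sum over the distinct canonical keys
lemma pvB_closed (grid : List String) (n : Int) :
    min_flips_to_symmetrize_alt grid n
      = ∑ k ∈ (pvCells n).toFinset.image (pvKeyF n),
          min (pvO grid n k) (((pvFib n k).card : Int) - pvO grid n k) := by
  rw [pvB_as_fold]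
  rw [PySem.Dict.values_eq_map_keys _ (pvBuild_nodup_keys grid n (pvCells n)) (0, 0)]
  have hfold := PySem.List.foldl_add
    ((pvBuild grid n (pvCells n) PySem.Dict.empty).keys.map
      (fun k => (pvBuild grid n (pvCells n) PySem.Dict.empty).getD k (0, 0)))
    (fun p : Int × Int => min p.1 (p.2 - p.1)) 0
  rw [hfold, List.map_map, pvBuild_keys, zero_add]
  have hgetD : ∀ k, (pvBuild grid n (pvCells n) PySem.Dict.empty).getD k (0, 0)
      = ((((pvCells n).filter (fun p => pvKeyF n p == k)).map (pvBit grid)).sum,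
         (((pvCells n).countP (fun p => pvKeyF n p == k)) : Int)) := by
    intro k
    rw [pvBuild_getD, PySem.Dict.getD_empty]
    simp
  have hnodup := PySem.Set.nodup_ofList ((pvCells n).map (pvKeyF n))
  rw [← List.sum_toFinset _ hnodup]
  have hKfin : (PySem.Set.ofList ((pvCells n).map (pvKeyF n))).toFinset
      = (pvCells n).toFinset.image (pvKeyF n) := by
    rw [← pv_toFinset_map]
    ext x
    simp [PySem.Set.mem_ofList]
  rw [hKfin]
  refine Finset.sum_congr rfl fun k hk => ?_
  simp only [Function.comp_apply, hgetD]
  -- identify the list-level counts with the Finset-level fiber data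
  have hfilter : ((pvCells n).filter (fun p => pvKeyF n p == k)).toFinset = pvFib n k := by
    rw [List.toFinset_filter, pvFib]
    refine Finset.filter_congr fun p _ => ?_
    simp
  have hfnodup : ((pvCells n).filter (fun p => pvKeyF n p == k)).Nodup :=
    (pvCells_nodup n).filter _
  have hO : (((pvCells n).filter (fun p => pvKeyF n p == k)).map (pvBit grid)).sum
      = pvO grid n k := by
    rw [← List.sum_toFinset _ hfnodup, hfilter, pvO]
  have hT : (((pvCells n).countP (fun p => pvKeyF n p == k)) : Int) = ((pvFib n k).card : Int) := by
    rw [← hfilter, List.toFinset_card_of_nodup hfnodup, List.countP_eq_length_filter]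
  rw [hO, hT]

lemma pvKeyF_idem (n : Int) (q : Int × Int) : pvKeyF n (pvKeyF n q) = pvKeyF n q := by
  rcases pvKeyF_mem n q with h | h | h | h <;> (conv_lhs => rw [h]) <;> simp [pvKeyF_rho]

lemma pvKeyF_mem_cells (n : Int) (q : Int × Int) (hq : q ∈ pvCells n) :
    pvKeyF n q ∈ pvCells n := by
  rcases pvKeyF_mem n q with h | h | h | h <;> rw [h]
  · exact hq
  · exact pvRho_mem n q hq
  · exact pvRho_mem _ _ (pvRho_mem n q hq)
  · exact pvRho_mem _ _ (pvRho_mem _ _ (pvRho_mem n q hq))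

-- the fiber of a canonical key is exactly its rotation orbit
lemma pvFib_eq (n : Int) (k q : Int × Int) (hq : q ∈ pvCells n) (hk : pvKeyF n q = k) :
    pvFib n k = insert k (insert (pvRho n k)
      (insert (pvRho n (pvRho n k)) {pvRho n (pvRho n (pvRho n k))})) := by
  have hkk : pvKeyF n k = k := by rw [← hk, pvKeyF_idem]
  have hkc : k ∈ pvCells n := by rw [← hk]; exact pvKeyF_mem_cells n q hq
  ext p
  simp only [pvFib, Finset.mem_filter, List.mem_toFinset, Finset.mem_insert,
    Finset.mem_singleton]
  constructor
  · rintro ⟨hp, hkey⟩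
    exact pvKeyF_orbit n p k (hkey.trans hkk.symm)
  · intro hp
    rcases hp with rfl | rfl | rfl | rfl
    · exact ⟨hkc, hkk⟩
    · exact ⟨pvRho_mem n k hkc, by rw [pvKeyF_rho]; exact hkk⟩
    · exact ⟨pvRho_mem _ _ (pvRho_mem n k hkc), by rw [pvKeyF_rho, pvKeyF_rho]; exact hkk⟩
    · exact ⟨pvRho_mem _ _ (pvRho_mem _ _ (pvRho_mem n k hkc)),
        by rw [pvKeyF_rho, pvKeyF_rho, pvKeyF_rho]; exact hkk⟩

-- per group: (size) * (orbit cost at the key) = 4 * (cheaper side of the group)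
lemma pvGroup_eq (grid : List String) (n : Int) (k q : Int × Int)
    (hq : q ∈ pvCells n) (hk : pvKeyF n q = k) :
    ((pvFib n k).card : Int) * pvTerm grid n k.1 k.2
      = 4 * min (pvO grid n k) (((pvFib n k).card : Int) - pvO grid n k) := by
  have hfib := pvFib_eq n k q hq hk
  obtain ⟨u, v⟩ := k
  by_cases hc : 2 * u = n - 1 ∧ 2 * v = n - 1
  · -- centre of an odd square: the orbit is the single fixed cell, both sides are 0
    have hb : pvRho n (u, v) = (u, v) := by
      simp only [pvRho, Prod.ext_iff]; omega
    simp only [hb] at hfib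
    have hcard : pvFib n (u, v) = {(u, v)} := by rw [hfib]; simp
    have hterm : pvTerm grid n u v = 0 := by
      simp only [pvTerm, show n - 1 - u = u from by omega, show v = u from by omega]
      rcases pvOne_mem grid u u with h | h <;> rw [h] <;> norm_num
    have hO : pvO grid n (u, v) = pvOne grid u v := by
      rw [pvO, hcard, Finset.sum_singleton, pvBit]
    rw [hcard, hterm, hO]
    rcases pvOne_mem grid u v with h | h <;> rw [h] <;> norm_num
  · -- a regular orbit of four distinct cells
    have e3 : n - 1 - (n - 1 - u) = u := by ring
    have hne1 : ((u, v) : Int × Int) ≠ pvRho n (u, v) := by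
      simp only [pvRho, ne_eq, Prod.ext_iff]; omega
    have hne2 : ((u, v) : Int × Int) ≠ pvRho n (pvRho n (u, v)) := by
      simp only [pvRho, ne_eq, Prod.ext_iff]; omega
    have hne3 : ((u, v) : Int × Int) ≠ pvRho n (pvRho n (pvRho n (u, v))) := by
      simp only [pvRho, ne_eq, Prod.ext_iff]; omega
    have hne4 : pvRho n (u, v) ≠ pvRho n (pvRho n (u, v)) := by
      simp only [pvRho, ne_eq, Prod.ext_iff]; omega
    have hne5 : pvRho n (u, v) ≠ pvRho n (pvRho n (pvRho n (u, v))) := by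
      simp only [pvRho, ne_eq, Prod.ext_iff]; omega
    have hne6 : pvRho n (pvRho n (u, v)) ≠ pvRho n (pvRho n (pvRho n (u, v))) := by
      simp only [pvRho, ne_eq, Prod.ext_iff]; omega
    have hm1 : ((u, v) : Int × Int) ∉ insert (pvRho n (u, v))
        (insert (pvRho n (pvRho n (u, v)))
          ({pvRho n (pvRho n (pvRho n (u, v)))} : Finset (Int × Int))) := by
      simp [hne1, hne2, hne3]
    have hm2 : pvRho n (u, v) ∉
        insert (pvRho n (pvRho n (u, v))) ({pvRho n (pvRho n (pvRho n (u, v)))} : Finset _) := by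
      simp [hne4, hne5]
    have hm3 : pvRho n (pvRho n (u, v)) ∉ ({pvRho n (pvRho n (pvRho n (u, v)))} : Finset _) := by
      simp [hne6]
    have hcard : ((pvFib n (u, v)).card : Int) = 4 := by
      rw [hfib, Finset.card_insert_of_notMem hm1, Finset.card_insert_of_notMem hm2,
        Finset.card_insert_of_notMem hm3, Finset.card_singleton]
      norm_num
    have hO : pvO grid n (u, v) = pvOne grid u v + pvOne grid v (n - 1 - u) +
        pvOne grid (n - 1 - u) (n - 1 - v) + pvOne grid (n - 1 - v) u := by
      rw [pvO, hfib, Finset.sum_insert hm1, Finset.sum_insert hm2, Finset.sum_insert hm3,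
        Finset.sum_singleton]
      simp only [pvBit, pvRho, e3]
      ring
    rw [hcard, hO]
    simp only [pvTerm]
    have h1 := pvOne_mem grid u v
    have h2 := pvOne_mem grid v (n - 1 - u)
    have h3 := pvOne_mem grid (n - 1 - u) (n - 1 - v)
    have h4 := pvOne_mem grid (n - 1 - v) u
    simp only [min_def]
    split_ifs <;> omega

lemma pvTermP_rho (grid : List String) (n : Int) (p : Int × Int) :
    pvTerm grid n (pvRho n p).1 (pvRho n p).2 = pvTerm grid n p.1 p.2 := by
  simp only [pvRho]
  exact pvTerm_rot grid n p.1 p.2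

lemma pvTermP_key (grid : List String) (n : Int) (p : Int × Int) :
    pvTerm grid n (pvKeyF n p).1 (pvKeyF n p).2 = pvTerm grid n p.1 p.2 := by
  rcases pvKeyF_mem n p with h | h | h | h <;> rw [h] <;>
    simp only [pvTermP_rho]

-- the square sum of orbit costs is four times B
lemma pvSquare_eq_4B (grid : List String) (n : Int) :
    ∑ p ∈ (pvCells n).toFinset, pvTerm grid n p.1 p.2
      = 4 * min_flips_to_symmetrize_alt grid n := by
  rw [pvB_closed, Finset.mul_sum ((pvCells n).toFinset.image (pvKeyF n))
    (fun k => min (pvO grid n k) (((pvFib n k).card : Int) - pvO grid n k)) 4]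
  have h1 : ∑ p ∈ (pvCells n).toFinset, pvTerm grid n p.1 p.2
      = ∑ p ∈ (pvCells n).toFinset,
          (fun k : Int × Int => pvTerm grid n k.1 k.2) (pvKeyF n p) :=
    Finset.sum_congr rfl (fun p _ => (pvTermP_key grid n p).symm)
  rw [h1, Finset.sum_comp (fun k : Int × Int => pvTerm grid n k.1 k.2) (pvKeyF n)]
  refine Finset.sum_congr rfl fun k hk => ?_
  obtain ⟨q, hq, hkq⟩ := Finset.mem_image.mp hk
  have hq' : q ∈ pvCells n := List.mem_toFinset.mp hq
  have hfilter : (pvCells n).toFinset.filter (fun a => pvKeyF n a = k) = pvFib n k := by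
    rw [pvFib]
  rw [hfilter, nsmul_eq_mul]
  exact pvGroup_eq grid n k q hq' hkq

-- the square sum of orbit costs is four times A
lemma pvSquare_eq_4A (grid : List String) (n : Int) (hn : 0 < n) :
    ∑ p ∈ (pvCells n).toFinset, pvTerm grid n p.1 p.2
      = 4 * min_flips_to_symmetrize grid n := by
  set N := n.toNat with hN
  have hn' : n = (N : Int) := by omega
  have hset : (pvCells n).toFinset
      = (Finset.range N ×ˢ Finset.range N).image
          (fun q : ℕ × ℕ => ((q.1 : Int), (q.2 : Int))) := by
    ext p
    obtain ⟨a, b⟩ := p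
    simp only [List.mem_toFinset, pvMem_cells, Finset.mem_image, Finset.mem_product,
      Finset.mem_range, Prod.ext_iff]
    constructor
    · rintro ⟨h1, h2, h3, h4⟩
      exact ⟨(a.toNat, b.toNat), ⟨by omega, by omega⟩, by omega, by omega⟩
    · rintro ⟨⟨x, y⟩, ⟨hx, hy⟩, h1, h2⟩
      simp only at h1 h2
      omega
  have hinj : ∀ x ∈ Finset.range N ×ˢ Finset.range N, ∀ y ∈ Finset.range N ×ˢ Finset.range N,
      (fun q : ℕ × ℕ => ((q.1 : Int), (q.2 : Int))) x
        = (fun q : ℕ × ℕ => ((q.1 : Int), (q.2 : Int))) y → x = y := by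
    rintro ⟨x1, y1⟩ _ ⟨x2, y2⟩ _ h
    simp only [Prod.ext_iff] at h ⊢
    omega
  rw [hset, Finset.sum_image hinj]
  have hcore := pv_core (fun p : ℕ × ℕ => pvTerm grid n (p.1 : Int) (p.2 : Int)) N
    (by
      intro i j hi hj
      simp only
      have hcast : ((N - 1 - i : ℕ) : Int) = n - 1 - (i : Int) := by omega
      rw [hcast]
      exact pvTerm_rot grid n (i : Int) (j : Int))
    (by
      intro hm
      simp only
      have hcc : n - 1 - ((N / 2 : ℕ) : Int) = ((N / 2 : ℕ) : Int) := by omega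
      simp only [pvTerm, hcc]
      rcases pvOne_mem grid ((N / 2 : ℕ) : Int) ((N / 2 : ℕ) : Int) with h | h <;>
        rw [h] <;> norm_num)
  rw [hcore, A_eq_sum]
  have hA : (PySem.Int.floordiv (n + 1) 2).toNat = (N + 1) / 2 := by
    rw [hn', show ((N : Int) + 1) = ((N + 1 : ℕ) : Int) from by push_cast; ring,
      show (2 : Int) = ((2 : ℕ) : Int) from rfl, PySem.Int.floordiv_natCast]
    exact Int.toNat_natCast _
  have hF : (PySem.Int.floordiv n 2).toNat = N / 2 := by
    rw [hn', show (2 : Int) = ((2 : ℕ) : Int) from rfl, PySem.Int.floordiv_natCast]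
    exact Int.toNat_natCast _
  rw [hA, hF]
  congr 1
  exact Finset.sum_product' (f := fun (a b : ℕ) => pvTerm grid n (a : Int) (b : Int)) _ _

lemma pv_AB (grid : List String) (n : Int) :
    min_flips_to_symmetrize grid n = min_flips_to_symmetrize_alt grid n := by
  rcases (by omega : n ≤ 0 ∨ 0 < n) with hn | hn
  · have e1 : PySem.List.pyRange 0 (PySem.Int.floordiv (n + 1) 2) 1 = [] := by
      apply PySem.List.pyRange_one_eq_nil
      rw [PySem.Int.floordiv_eq_ediv_of_pos (by norm_num)]
      omega
    have e2 : PySem.List.pyRange 0 n 1 = [] := PySem.List.pyRange_one_eq_nil hn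
    unfold min_flips_to_symmetrize min_flips_to_symmetrize_alt
    rw [e1, e2]
    simp only [List.foldl_nil]
    rw [PySem.Dict.values_eq_map_keys _ PySem.Dict.nodup_keys_empty (0, 0),
      PySem.Dict.keys_empty]
    simp
  · have hA := pvSquare_eq_4A grid n hn
    have hB := pvSquare_eq_4B grid n
    omega

-- ===== VERDICT (by name: the statement is the Claim_ definition above) =====
theorem min_flips_to_symmetrize_spec : Claim_equal_min_flips_to_symmetrize := by
  intro grid n _ _
  show min_flips_to_symmetrize grid n = min_flips_to_symmetrize_alt grid n
  exact pv_AB grid n
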